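-- pv_equiv track=rewrite | github.com/telinit/lcme_achievements | achievements/main_app/util/data_import.py | crop_list2d_csv_like
-- ===== SOURCE A (Python) =====
-- list2d = list[list[str]]
--
-- def crop_list2d_csv_like(data: list2d) -> list2d:
--     if data == [] or data[0] == []:
--         return data
--
--     empty_idx = -1
--     for (i,c) in zip( range(len(data[0])), data[0] ):
--         if c.strip() == '':
--             empty_idx = i
--
--     if empty_idx < 0:
--         return data
--
--     result = []
--     for row in data:
--         result.append(row[0:empty_idx])
--
--     return result
-- ===== SOURCE B (Python) =====
-- def crop_list2d_csv_like(data):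
--     if data == [] or data[0] == []:
--         return data
--
--     # Suffix-OR pass over the header: keep[j] is True iff some column AFTER j
--     # is blank; no index of the blank column is ever computed.
--     keep = []
--     seen_blank = False
--     for c in reversed(data[0]):
--         keep.append(seen_blank)
--         seen_blank = seen_blank or c.strip() == ''
--
--     if not seen_blank:
--         return data
--
--     keep.reverse()
--     return [[cell for cell, k in zip(row, keep) if k] for row in data]
-- ===== Notes on version B (the rewrite author's own statement) =====
-- stated objective: alternative
-- what changed: Instead of locating the last blank header column's index and slicing every row, B computes a per-column boolean keep-mask by a suffix-OR pass over the header (keep a column iff some later column is blank) and filters each row by zipping it with the mask; no index or slice is used.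
import Mathlib
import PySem

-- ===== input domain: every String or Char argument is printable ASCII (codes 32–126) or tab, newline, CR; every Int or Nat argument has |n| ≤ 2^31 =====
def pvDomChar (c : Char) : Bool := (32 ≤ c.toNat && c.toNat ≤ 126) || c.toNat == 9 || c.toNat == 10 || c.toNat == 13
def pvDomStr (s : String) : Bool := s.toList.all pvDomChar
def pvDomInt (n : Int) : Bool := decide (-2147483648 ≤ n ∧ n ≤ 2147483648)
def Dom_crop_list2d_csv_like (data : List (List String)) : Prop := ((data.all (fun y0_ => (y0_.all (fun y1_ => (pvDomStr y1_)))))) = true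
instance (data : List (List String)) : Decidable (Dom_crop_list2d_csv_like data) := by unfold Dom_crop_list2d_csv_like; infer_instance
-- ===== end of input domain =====

-- B replaces the last-blank-index search + per-row slicing with a suffix-OR
-- keep-mask over the header columns and a zip/filter of each row against it
-- (alternative formulation, same cost); proved to return the same value.

-- ===== PORT A =====
def crop_list2d_csv_like (data : List (List String)) : List (List String) :=
  if data = [] ∨ data.headD [] = [] then data
  else
    let empty_idx : Int :=
      (PySem.List.enumerate (data.headD []) 0).foldl
        (fun acc p => if PySem.Str.strip p.2 = "" then p.1 else acc) (-1)
    if empty_idx < 0 then data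
    else data.foldl (fun result row =>
      result ++ [PySem.List.slice row (some 0) (some empty_idx)]) []

-- ===== PORT B =====
def crop_list2d_csv_like_alt (data : List (List String)) : List (List String) :=
  if data = [] ∨ data.headD [] = [] then data
  else
    -- for c in reversed(data[0]): keep.append(seen); seen = seen or blank c
    let st := (data.headD []).reverse.foldl
      (fun (st : List Bool × Bool) c =>
        (st.1 ++ [st.2], st.2 || decide (PySem.Str.strip c = ""))) ([], false)
    if st.2 = false then data
    else data.map (fun row =>
      ((row.zip st.1.reverse).filter (fun q => q.2)).map (fun q => q.1))

-- ===== PRECONDITION & SPEC =====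
def Spec_crop_list2d_csv_like (data : List (List String)) (out : List (List String)) : Prop := out = crop_list2d_csv_like_alt data
instance (data : List (List String)) (out : List (List String)) : Decidable (Spec_crop_list2d_csv_like data out) := by unfold Spec_crop_list2d_csv_like; infer_instance

-- ===== CLAIM (what is proved, stated in full; the proofs are below) =====
def Claim_equal_crop_list2d_csv_like : Prop := ∀ (data : List (List String)), Dom_crop_list2d_csv_like data → Spec_crop_list2d_csv_like data (crop_list2d_csv_like data)

-- ===== LEMMAS AND PROOFS =====

-- blank test shared by the analyses below
def pvBlank (c : String) : Bool := decide (PySem.Str.strip c = "")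

-- index of the LAST blank column of the header, if any
def lastBlank : List String → Option Nat
  | [] => none
  | c :: t =>
    match lastBlank t with
    | some j => some (j + 1)
    | none => if pvBlank c then some 0 else none

theorem lastBlank_isSome (h : List String) :
    (lastBlank h).isSome = h.any pvBlank := by
  induction h with
  | nil => rfl
  | cons c t ih =>
    simp only [lastBlank, List.any_cons, ← ih]
    cases ht : lastBlank t with
    | some j => simp
    | none => by_cases hc : pvBlank c = true <;> simp [hc]

theorem lastBlank_lt (h : List String) : ∀ (j : Nat), lastBlank h = some j → j < h.length := by
  induction h with
  | nil => intro j hj; simp [lastBlank] at hj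
  | cons c t ih =>
    intro j hj
    simp only [lastBlank] at hj
    cases ht : lastBlank t with
    | some k =>
      rw [ht] at hj
      injection hj with e
      have := ih k ht
      simp only [List.length_cons]
      omega
    | none =>
      rw [ht] at hj
      split_ifs at hj
      injection hj with e
      simp only [List.length_cons]
      omega

-- A's fold over the enumerated header computes the last blank index
theorem foldA_eq_lastBlank (h : List String) : ∀ (s a : Int),
    (PySem.List.enumerate h s).foldl
      (fun acc p => if PySem.Str.strip p.2 = "" then p.1 else acc) a
    = match lastBlank h with
      | some j => s + (j : Int)
      | none => a := by
  induction h with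
  | nil => intro s a; rfl
  | cons c t ih =>
    intro s a
    rw [PySem.List.enumerate_cons, List.foldl_cons, ih]
    simp only [lastBlank]
    cases ht : lastBlank t with
    | some j =>
      show s + 1 + (j : Int) = s + ((j + 1 : Nat) : Int)
      push_cast; ring
    | none =>
      by_cases hc : PySem.Str.strip c = "" <;> simp [hc, pvBlank]

-- B's fold yields seen = "some column is blank" and the as-built mask:
-- falses for the columns from the last blank onward, trues before it
theorem foldB_spec (h : List String) :
    (h.reverse.foldl
      (fun (st : List Bool × Bool) c =>
        (st.1 ++ [st.2], st.2 || decide (PySem.Str.strip c = ""))) ([], false))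
    = (match lastBlank h with
       | some j => List.replicate (h.length - j) false ++ List.replicate j true
       | none => List.replicate h.length false,
       h.any pvBlank) := by
  rw [List.foldl_reverse]
  induction h with
  | nil => rfl
  | cons c t ih =>
    simp only [List.foldr_cons, ih, List.any_cons, lastBlank]
    cases ht : lastBlank t with
    | some j =>
      have hany : t.any pvBlank = true := by rw [← lastBlank_isSome, ht]; rfl
      have hj := lastBlank_lt t j ht
      simp only [hany, Bool.or_true, List.length_cons, Nat.succ_sub_succ]
      simp only [List.replicate_succ']
      simp [List.append_assoc]
    | none =>
      have hany : t.any pvBlank = false := by rw [← lastBlank_isSome, ht]; rfl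
      by_cases hc : PySem.Str.strip c = ""
      · simp [hc, hany, pvBlank, ← List.replicate_succ']
      · simp [hc, hany, pvBlank, ← List.replicate_succ']

-- zipping a row with an all-false mask keeps nothing
theorem filter_zip_false (row : List String) : ∀ (m : Nat),
    ((row.zip (List.replicate m false)).filter (fun q => q.2)) = [] := by
  induction row with
  | nil => intro m; simp
  | cons x r ih =>
    intro m
    cases m with
    | zero => simp
    | succ m' =>
      simp only [List.replicate_succ, List.zip_cons_cons, List.filter_cons]
      simpa using ih m'

-- filtering a row through a trues-then-falses mask is taking the prefix
theorem filter_mask (row : List String) : ∀ (j m : Nat),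
    (((row.zip (List.replicate j true ++ List.replicate m false)).filter
      (fun q => q.2)).map (fun q => q.1)) = row.take j := by
  induction row with
  | nil => intro j m; simp
  | cons x r ih =>
    intro j m
    cases j with
    | zero => simp [filter_zip_false]
    | succ j' =>
      simp only [List.replicate_succ, List.cons_append, List.zip_cons_cons,
        List.filter_cons, List.take_succ_cons]
      simpa using ih j' m

theorem foldl_append_eq_map (e : Int) (data : List (List String)) :
    data.foldl (fun result row =>
      result ++ [PySem.List.slice row (some 0) (some e)]) []
    = data.map (fun row => PySem.List.slice row (some 0) (some e)) := by
  simpa using PySem.List.foldl_append_singleton_eq_map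
    (fun row => PySem.List.slice row (some 0) (some e)) data []

-- ===== VERDICT (by name: the statement is the Claim_ definition above) =====
theorem crop_list2d_csv_like_spec : Claim_equal_crop_list2d_csv_like := by
  unfold Claim_equal_crop_list2d_csv_like
  intro data _
  unfold Spec_crop_list2d_csv_like crop_list2d_csv_like crop_list2d_csv_like_alt
  by_cases hguard : data = [] ∨ data.headD [] = []
  · rw [if_pos hguard, if_pos hguard]
  · rw [if_neg hguard, if_neg hguard]
    simp only [foldA_eq_lastBlank, foldB_spec, List.headD_eq_head?_getD]
    cases hlb : lastBlank (data.head?.getD []) with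
    | none =>
      have hany : (data.head?.getD []).any pvBlank = false := by
        rw [← lastBlank_isSome, hlb]; rfl
      simp [hany]
    | some j =>
      have hany : (data.head?.getD []).any pvBlank = true := by
        rw [← lastBlank_isSome, hlb]; rfl
      have hnotlt : ¬ ((0 : Int) + (j : Int) < 0) := by omega
      simp only [hany, hnotlt, if_false, Bool.true_eq_false]
      rw [foldl_append_eq_map]
      apply List.map_congr_left
      intro row _
      rw [List.reverse_append, List.reverse_replicate, List.reverse_replicate,
        show ((0 : Int) + (j : Int)) = ((j : Nat) : Int) by omega]
      simp only [PySem.List.slice_zero_start, PySem.List.slice_to_natCast]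
      exact (filter_mask row j _).symm
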